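-- pv_equiv track=rewrite | github.com/Rajkrpaul/chess_assistant | backend/ai_service_analysis.py | get_opening_name
-- ===== SOURCE A (Python) =====
-- from typing import List, Optional, Dict, Any, Tuple
--
-- ECO_BOOK: Dict[str, str] = {
--     "e2e4": "King's Pawn Opening",
--     "d2d4": "Queen's Pawn Opening",
--     "g1f3": "Réti Opening",
--     "c2c4": "English Opening",
--     "e2e4 e7e5": "Open Game",
--     "e2e4 e7e5 g1f3": "King's Knight Opening",
--     "e2e4 e7e5 g1f3 b8c6": "Three Knights / Ruy Lopez setup",
--     "e2e4 e7e5 g1f3 b8c6 f1b5": "Ruy Lopez",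
--     "e2e4 e7e5 g1f3 b8c6 f1c4": "Italian Game",
--     "e2e4 e7e5 g1f3 b8c6 d2d4": "Scotch Game",
--     "e2e4 e7e5 g1f3 g8f6": "Petrov's Defense",
--     "e2e4 c7c5": "Sicilian Defense",
--     "e2e4 c7c5 g1f3": "Sicilian — Open",
--     "e2e4 c7c5 g1f3 d7d6": "Sicilian — Najdorf setup",
--     "e2e4 c7c5 g1f3 b8c6": "Sicilian — Classical",
--     "e2e4 e7e6": "French Defense",
--     "e2e4 e7e6 d2d4": "French — Advance setup",
--     "e2e4 c7c6": "Caro-Kann Defense",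
--     "e2e4 d7d5": "Scandinavian Defense",
--     "e2e4 d7d6": "Pirc Defense",
--     "d2d4 d7d5": "Queen's Gambit setup",
--     "d2d4 d7d5 c2c4": "Queen's Gambit",
--     "d2d4 d7d5 c2c4 e7e6": "Queen's Gambit Declined",
--     "d2d4 d7d5 c2c4 c7c6": "Slav Defense",
--     "d2d4 d7d5 c2c4 d5c4": "Queen's Gambit Accepted",
--     "d2d4 g8f6": "Indian Defense",
--     "d2d4 g8f6 c2c4": "Indian — c4",
--     "d2d4 g8f6 c2c4 e7e6": "Nimzo/Queen's Indian setup",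
--     "d2d4 g8f6 c2c4 g7g6": "King's Indian Defense",
--     "d2d4 g8f6 c2c4 c7c5": "Benoni Defense",
--     "d2d4 g8f6 c2c4 e7e6 g1f3 b7b6": "Queen's Indian Defense",
--     "d2d4 g8f6 c2c4 e7e6 b1c3 f8b4": "Nimzo-Indian Defense",
--     "g1f3 g8f6 c2c4": "Réti — English hybrid",
--     "c2c4 e7e5": "English Opening — Reversed Sicilian",
--     "e2e4 e7e5 f2f4": "King's Gambit",
--     "e2e4 e7e5 f2f4 e5f4": "King's Gambit Accepted",
--     "e2e4 e7e5 g1f3 b8c6 f1c4 g8f6": "Two Knights Defense",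
--     "e2e4 e7e5 g1f3 b8c6 f1c4 f8c5": "Italian — Giuoco Piano",
--     "d2d4 d7d5 c2c4 c7c6 g1f3 g8f6": "Slav — Main Line",
-- }
--
-- def _moves_key(board_moves: List[str]) -> str:
--     return " ".join(board_moves)
--
-- def get_opening_name(move_history: List[str]) -> str:
--     best = "Unknown Opening"
--     for i in range(len(move_history), 0, -1):
--         key = _moves_key(move_history[:i])
--         if key in ECO_BOOK:
--             best = ECO_BOOK[key]
--             break
--     return best
-- ===== SOURCE B (Python) =====
-- from typing import List
--
-- # The opening book keyed by move sequences (same data as the joined-string book,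
-- # with each key stored as its list of moves).
-- _BOOK = [
--     (['e2e4'], "King's Pawn Opening"),
--     (['d2d4'], "Queen's Pawn Opening"),
--     (['g1f3'], 'Réti Opening'),
--     (['c2c4'], 'English Opening'),
--     (['e2e4', 'e7e5'], 'Open Game'),
--     (['e2e4', 'e7e5', 'g1f3'], "King's Knight Opening"),
--     (['e2e4', 'e7e5', 'g1f3', 'b8c6'], 'Three Knights / Ruy Lopez setup'),
--     (['e2e4', 'e7e5', 'g1f3', 'b8c6', 'f1b5'], 'Ruy Lopez'),
--     (['e2e4', 'e7e5', 'g1f3', 'b8c6', 'f1c4'], 'Italian Game'),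
--     (['e2e4', 'e7e5', 'g1f3', 'b8c6', 'd2d4'], 'Scotch Game'),
--     (['e2e4', 'e7e5', 'g1f3', 'g8f6'], "Petrov's Defense"),
--     (['e2e4', 'c7c5'], 'Sicilian Defense'),
--     (['e2e4', 'c7c5', 'g1f3'], 'Sicilian — Open'),
--     (['e2e4', 'c7c5', 'g1f3', 'd7d6'], 'Sicilian — Najdorf setup'),
--     (['e2e4', 'c7c5', 'g1f3', 'b8c6'], 'Sicilian — Classical'),
--     (['e2e4', 'e7e6'], 'French Defense'),
--     (['e2e4', 'e7e6', 'd2d4'], 'French — Advance setup'),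
--     (['e2e4', 'c7c6'], 'Caro-Kann Defense'),
--     (['e2e4', 'd7d5'], 'Scandinavian Defense'),
--     (['e2e4', 'd7d6'], 'Pirc Defense'),
--     (['d2d4', 'd7d5'], "Queen's Gambit setup"),
--     (['d2d4', 'd7d5', 'c2c4'], "Queen's Gambit"),
--     (['d2d4', 'd7d5', 'c2c4', 'e7e6'], "Queen's Gambit Declined"),
--     (['d2d4', 'd7d5', 'c2c4', 'c7c6'], 'Slav Defense'),
--     (['d2d4', 'd7d5', 'c2c4', 'd5c4'], "Queen's Gambit Accepted"),
--     (['d2d4', 'g8f6'], 'Indian Defense'),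
--     (['d2d4', 'g8f6', 'c2c4'], 'Indian — c4'),
--     (['d2d4', 'g8f6', 'c2c4', 'e7e6'], "Nimzo/Queen's Indian setup"),
--     (['d2d4', 'g8f6', 'c2c4', 'g7g6'], "King's Indian Defense"),
--     (['d2d4', 'g8f6', 'c2c4', 'c7c5'], 'Benoni Defense'),
--     (['d2d4', 'g8f6', 'c2c4', 'e7e6', 'g1f3', 'b7b6'], "Queen's Indian Defense"),
--     (['d2d4', 'g8f6', 'c2c4', 'e7e6', 'b1c3', 'f8b4'], 'Nimzo-Indian Defense'),
--     (['g1f3', 'g8f6', 'c2c4'], 'Réti — English hybrid'),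
--     (['c2c4', 'e7e5'], 'English Opening — Reversed Sicilian'),
--     (['e2e4', 'e7e5', 'f2f4'], "King's Gambit"),
--     (['e2e4', 'e7e5', 'f2f4', 'e5f4'], "King's Gambit Accepted"),
--     (['e2e4', 'e7e5', 'g1f3', 'b8c6', 'f1c4', 'g8f6'], 'Two Knights Defense'),
--     (['e2e4', 'e7e5', 'g1f3', 'b8c6', 'f1c4', 'f8c5'], 'Italian — Giuoco Piano'),
--     (['d2d4', 'd7d5', 'c2c4', 'c7c6', 'g1f3', 'g8f6'], 'Slav — Main Line'),
-- ]
--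
-- def get_opening_name(move_history: List[str]) -> str:
--     # Single scan of the book: keep the entry whose move sequence is a prefix
--     # of move_history and is the longest such.
--     best_len = 0
--     best = "Unknown Opening"
--     for moves, name in _BOOK:
--         n = len(moves)
--         if n > best_len and move_history[:n] == moves:
--             best_len = n
--             best = name
--     return best
-- ===== Notes on version B (the rewrite author's own statement) =====
-- stated objective: faster
-- what changed: A probes the string-keyed dict with each space-joined prefix from the longest down and breaks at the first hit; B keys the book by move sequences and makes one scan over the book, keeping the entry whose move list is the longest prefix of move_history; Pre_ excludes only inputs where a space inside a move makes a joined prefix collide with a book key.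
-- outside the precondition, e.g. on get_opening_name(['e2e4 e7e5']): A returns 'Open Game', B returns 'Unknown Opening'
import Mathlib
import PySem

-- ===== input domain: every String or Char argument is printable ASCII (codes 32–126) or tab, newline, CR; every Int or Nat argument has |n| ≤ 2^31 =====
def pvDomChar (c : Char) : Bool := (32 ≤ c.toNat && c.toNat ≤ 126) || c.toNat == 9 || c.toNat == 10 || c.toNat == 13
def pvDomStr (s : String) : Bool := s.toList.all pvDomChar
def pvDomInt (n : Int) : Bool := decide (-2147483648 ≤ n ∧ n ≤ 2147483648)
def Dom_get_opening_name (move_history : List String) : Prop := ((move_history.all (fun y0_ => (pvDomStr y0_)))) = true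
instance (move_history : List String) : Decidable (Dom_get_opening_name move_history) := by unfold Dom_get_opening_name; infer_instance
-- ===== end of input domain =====

-- B replaces A's longest-first probing of a string-keyed dict with space-joined prefixes by a
-- single scan of a book keyed by move sequences, keeping the longest entry that is a prefix of
-- move_history; equal return values on every input admitted by Pre_ (which excludes only
-- join-collisions caused by a space inside a move).

-- ===== PORT A =====
def ecoBook : PySem.Dict String String := PySem.Dict.ofList [
    ("e2e4", "King's Pawn Opening"),
    ("d2d4", "Queen's Pawn Opening"),
    ("g1f3", "Réti Opening"),
    ("c2c4", "English Opening"),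
    ("e2e4 e7e5", "Open Game"),
    ("e2e4 e7e5 g1f3", "King's Knight Opening"),
    ("e2e4 e7e5 g1f3 b8c6", "Three Knights / Ruy Lopez setup"),
    ("e2e4 e7e5 g1f3 b8c6 f1b5", "Ruy Lopez"),
    ("e2e4 e7e5 g1f3 b8c6 f1c4", "Italian Game"),
    ("e2e4 e7e5 g1f3 b8c6 d2d4", "Scotch Game"),
    ("e2e4 e7e5 g1f3 g8f6", "Petrov's Defense"),
    ("e2e4 c7c5", "Sicilian Defense"),
    ("e2e4 c7c5 g1f3", "Sicilian — Open"),
    ("e2e4 c7c5 g1f3 d7d6", "Sicilian — Najdorf setup"),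
    ("e2e4 c7c5 g1f3 b8c6", "Sicilian — Classical"),
    ("e2e4 e7e6", "French Defense"),
    ("e2e4 e7e6 d2d4", "French — Advance setup"),
    ("e2e4 c7c6", "Caro-Kann Defense"),
    ("e2e4 d7d5", "Scandinavian Defense"),
    ("e2e4 d7d6", "Pirc Defense"),
    ("d2d4 d7d5", "Queen's Gambit setup"),
    ("d2d4 d7d5 c2c4", "Queen's Gambit"),
    ("d2d4 d7d5 c2c4 e7e6", "Queen's Gambit Declined"),
    ("d2d4 d7d5 c2c4 c7c6", "Slav Defense"),
    ("d2d4 d7d5 c2c4 d5c4", "Queen's Gambit Accepted"),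
    ("d2d4 g8f6", "Indian Defense"),
    ("d2d4 g8f6 c2c4", "Indian — c4"),
    ("d2d4 g8f6 c2c4 e7e6", "Nimzo/Queen's Indian setup"),
    ("d2d4 g8f6 c2c4 g7g6", "King's Indian Defense"),
    ("d2d4 g8f6 c2c4 c7c5", "Benoni Defense"),
    ("d2d4 g8f6 c2c4 e7e6 g1f3 b7b6", "Queen's Indian Defense"),
    ("d2d4 g8f6 c2c4 e7e6 b1c3 f8b4", "Nimzo-Indian Defense"),
    ("g1f3 g8f6 c2c4", "Réti — English hybrid"),
    ("c2c4 e7e5", "English Opening — Reversed Sicilian"),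
    ("e2e4 e7e5 f2f4", "King's Gambit"),
    ("e2e4 e7e5 f2f4 e5f4", "King's Gambit Accepted"),
    ("e2e4 e7e5 g1f3 b8c6 f1c4 g8f6", "Two Knights Defense"),
    ("e2e4 e7e5 g1f3 b8c6 f1c4 f8c5", "Italian — Giuoco Piano"),
    ("d2d4 d7d5 c2c4 c7c6 g1f3 g8f6", "Slav — Main Line")]

def movesKey (board_moves : List String) : String := PySem.Str.join " " board_moves

-- literal port of A's loop: for i in range(len(move_history), 0, -1): probe, break at first hit
def getOpeningLoop (move_history : List String) : List Int → String
  | [] => "Unknown Opening"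
  | i :: rest =>
    let key := movesKey (PySem.List.slice move_history none (some i))
    match ecoBook.get? key with
    | some v => v
    | none => getOpeningLoop move_history rest

def get_opening_name (move_history : List String) : String :=
  getOpeningLoop move_history (PySem.List.pyRange (move_history.length : Int) 0 (-1))

-- ===== PORT B =====
-- the same opening data, keyed by move sequences (Source B's _BOOK)
def bookAlt : List (List String × String) := [
    (["e2e4"], "King's Pawn Opening"),
    (["d2d4"], "Queen's Pawn Opening"),
    (["g1f3"], "Réti Opening"),
    (["c2c4"], "English Opening"),
    (["e2e4", "e7e5"], "Open Game"),
    (["e2e4", "e7e5", "g1f3"], "King's Knight Opening"),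
    (["e2e4", "e7e5", "g1f3", "b8c6"], "Three Knights / Ruy Lopez setup"),
    (["e2e4", "e7e5", "g1f3", "b8c6", "f1b5"], "Ruy Lopez"),
    (["e2e4", "e7e5", "g1f3", "b8c6", "f1c4"], "Italian Game"),
    (["e2e4", "e7e5", "g1f3", "b8c6", "d2d4"], "Scotch Game"),
    (["e2e4", "e7e5", "g1f3", "g8f6"], "Petrov's Defense"),
    (["e2e4", "c7c5"], "Sicilian Defense"),
    (["e2e4", "c7c5", "g1f3"], "Sicilian — Open"),
    (["e2e4", "c7c5", "g1f3", "d7d6"], "Sicilian — Najdorf setup"),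
    (["e2e4", "c7c5", "g1f3", "b8c6"], "Sicilian — Classical"),
    (["e2e4", "e7e6"], "French Defense"),
    (["e2e4", "e7e6", "d2d4"], "French — Advance setup"),
    (["e2e4", "c7c6"], "Caro-Kann Defense"),
    (["e2e4", "d7d5"], "Scandinavian Defense"),
    (["e2e4", "d7d6"], "Pirc Defense"),
    (["d2d4", "d7d5"], "Queen's Gambit setup"),
    (["d2d4", "d7d5", "c2c4"], "Queen's Gambit"),
    (["d2d4", "d7d5", "c2c4", "e7e6"], "Queen's Gambit Declined"),
    (["d2d4", "d7d5", "c2c4", "c7c6"], "Slav Defense"),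
    (["d2d4", "d7d5", "c2c4", "d5c4"], "Queen's Gambit Accepted"),
    (["d2d4", "g8f6"], "Indian Defense"),
    (["d2d4", "g8f6", "c2c4"], "Indian — c4"),
    (["d2d4", "g8f6", "c2c4", "e7e6"], "Nimzo/Queen's Indian setup"),
    (["d2d4", "g8f6", "c2c4", "g7g6"], "King's Indian Defense"),
    (["d2d4", "g8f6", "c2c4", "c7c5"], "Benoni Defense"),
    (["d2d4", "g8f6", "c2c4", "e7e6", "g1f3", "b7b6"], "Queen's Indian Defense"),
    (["d2d4", "g8f6", "c2c4", "e7e6", "b1c3", "f8b4"], "Nimzo-Indian Defense"),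
    (["g1f3", "g8f6", "c2c4"], "Réti — English hybrid"),
    (["c2c4", "e7e5"], "English Opening — Reversed Sicilian"),
    (["e2e4", "e7e5", "f2f4"], "King's Gambit"),
    (["e2e4", "e7e5", "f2f4", "e5f4"], "King's Gambit Accepted"),
    (["e2e4", "e7e5", "g1f3", "b8c6", "f1c4", "g8f6"], "Two Knights Defense"),
    (["e2e4", "e7e5", "g1f3", "b8c6", "f1c4", "f8c5"], "Italian — Giuoco Piano"),
    (["d2d4", "d7d5", "c2c4", "c7c6", "g1f3", "g8f6"], "Slav — Main Line")]

-- one step of Source B's loop; the state is (best_len, best)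
def altStep (move_history : List String) (st : Int × String) (p : List String × String) : Int × String :=
  if ((p.1.length : Int) > st.1) && (PySem.List.slice move_history none (some (p.1.length : Int)) == p.1)
  then ((p.1.length : Int), p.2) else st

def get_opening_name_alt (move_history : List String) : String :=
  (bookAlt.foldl (altStep move_history) ((0 : Int), "Unknown Opening")).2

-- ===== PRE / SPEC =====
-- Pre_ excludes only move lists in which some space-joined prefix coincides with a book key's
-- joined form without being that key's move sequence (possible only when a move itself contains
-- a space): there A keys on the joined string and B on the move sequence, both defensible on
-- such malformed moves, so exactly those collision inputs are excluded.
def Pre_get_opening_name (move_history : List String) : Prop :=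
  ∀ i ∈ List.range move_history.length, ∀ p ∈ bookAlt,
    PySem.Str.join " " (move_history.take (i + 1)) = PySem.Str.join " " p.1 →
    move_history.take (i + 1) = p.1
instance (move_history : List String) : Decidable (Pre_get_opening_name move_history) := by unfold Pre_get_opening_name; infer_instance

def pvWitness_get_opening_name : List String := ["e2e4", "e7e5", "g1f3"]

def Spec_get_opening_name (move_history : List String) (out : String) : Prop := out = get_opening_name_alt move_history
instance (move_history : List String) (out : String) : Decidable (Spec_get_opening_name move_history out) := by unfold Spec_get_opening_name; infer_instance

-- ===== CLAIM (what is proved, stated in full; the proofs are below) =====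
def Claim_equal_get_opening_name : Prop := ∀ (move_history : List String), Dom_get_opening_name move_history → Pre_get_opening_name move_history → Spec_get_opening_name move_history (get_opening_name move_history)

-- ===== LEMMAS AND PROOFS =====

--------------------------------------------------------------------------------
-- A-side: the loop is a findSome? over the descending index range
--------------------------------------------------------------------------------

def pvLook (mh : List String) (i : Int) : Option String :=
  ecoBook.get? (movesKey (PySem.List.slice mh none (some i)))

set_option maxRecDepth 400000 in
theorem getOpeningLoop_nil (mh : List String) : getOpeningLoop mh [] = "Unknown Opening" := rfl

set_option maxRecDepth 400000 in
theorem getOpeningLoop_cons (mh : List String) (i : Int) (rest : List Int) :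
    getOpeningLoop mh (i :: rest)
      = (match pvLook mh i with
         | some v => v
         | none => getOpeningLoop mh rest) := rfl

theorem getOpeningLoop_eq_findSome (mh : List String) (is : List Int) :
    getOpeningLoop mh is = (is.findSome? (pvLook mh)).getD "Unknown Opening" := by
  induction is with
  | nil => rw [getOpeningLoop_nil]; rfl
  | cons i rest ih =>
    rw [getOpeningLoop_cons, List.findSome?_cons]
    cases h : pvLook mh i with
    | some v => simp
    | none => simpa using ih

-- the descending index list n, n-1, ..., 1
def descN : Nat → List Nat
  | 0 => []
  | j + 1 => (j + 1) :: descN j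

theorem descN_eq_map_range : ∀ n : Nat, (List.range n).map (fun k => n - k) = descN n := by
  intro n
  induction n with
  | zero => rfl
  | succ j ih =>
    rw [List.range_succ_eq_map, List.map_cons, List.map_map, descN]
    congr 1
    rw [← ih]
    apply List.map_congr_left
    intro k _
    simp [Function.comp, Nat.succ_sub_succ]

theorem mem_descN : ∀ (n i : Nat), i ∈ descN n ↔ 1 ≤ i ∧ i ≤ n := by
  intro n
  induction n with
  | zero => intro i; simp [descN]; omega
  | succ j ih => intro i; simp [descN, ih]; omega

theorem findSome?_congr_mem {A B : Type} (l : List A) (f g : A → Option B)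
    (h : ∀ x ∈ l, f x = g x) : l.findSome? f = l.findSome? g := by
  induction l with
  | nil => rfl
  | cons a t ih =>
    rw [List.findSome?_cons, List.findSome?_cons, h a (by simp)]
    cases g a with
    | some v => rfl
    | none => exact ih (fun x hx => h x (by simp [hx]))

theorem find?_congr_mem {A : Type} (l : List A) (p q : A → Bool)
    (h : ∀ x ∈ l, p x = q x) : l.find? p = l.find? q := by
  induction l with
  | nil => rfl
  | cons a t ih =>
    rw [List.find?_cons, List.find?_cons, h a (by simp)]
    cases q a with
    | true => rfl
    | false => exact ih (fun x hx => h x (by simp [hx]))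

set_option maxRecDepth 400000 in
theorem A_eq_findSome_descN (mh : List String) :
    get_opening_name mh
      = ((descN mh.length).findSome? (fun j : Nat => pvLook mh (j : Int))).getD "Unknown Opening" := by
  show getOpeningLoop mh (PySem.List.pyRange (mh.length : Int) 0 (-1)) = _
  rw [getOpeningLoop_eq_findSome, PySem.List.pyRange_neg_one, List.findSome?_map]
  have hn : ((((mh.length : Int)) - 0).toNat) = mh.length := by omega
  rw [hn]
  congr 1
  have hdesc : (descN mh.length).findSome? (fun j : Nat => pvLook mh (j : Int))
      = (List.range mh.length).findSome? (fun k : Nat => pvLook mh ((mh.length - k : Nat) : Int)) := by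
    rw [← descN_eq_map_range mh.length, List.findSome?_map]
    rfl
  rw [hdesc]
  apply findSome?_congr_mem
  intro k hk
  have hk' : k < mh.length := List.mem_range.mp hk
  show pvLook mh ((mh.length : Int) - k) = pvLook mh ((mh.length - k : Nat) : Int)
  congr 1
  omega

--------------------------------------------------------------------------------
-- the dict lookup as an association-list scan over the move-sequence book
--------------------------------------------------------------------------------

theorem dictGet_eq_find? {K V : Type} [BEq K] :
    ∀ (l : List (K × V)) (x : K),
      (PySem.Dict.mk l).get? x = (l.find? (fun q => q.1 == x)).map (·.2) := by
  intro l
  induction l with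
  | nil => intro x; rfl
  | cons p rest ih =>
    intro x
    rw [show (p :: rest) = ((p.1, p.2) :: rest) by rfl, PySem.Dict.get?_mk_cons, List.find?_cons]
    cases h : (p.1 == x) with
    | true => simp
    | false => simp [ih x]

set_option maxRecDepth 100000 in
theorem ecoBook_eq_mk : ecoBook = PySem.Dict.mk (bookAlt.map (fun p => (movesKey p.1, p.2))) := by
  decide

theorem lookup_eq (s : String) :
    ecoBook.get? s = (bookAlt.find? (fun p => movesKey p.1 == s)).map (·.2) := by
  rw [ecoBook_eq_mk, dictGet_eq_find?, List.find?_map, Option.map_map]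
  rfl

--------------------------------------------------------------------------------
-- book facts (by computation) and the Nat-indexed lookup
--------------------------------------------------------------------------------

set_option maxRecDepth 100000 in
theorem book_wf : ∀ p ∈ bookAlt, p.1 ≠ [] := by decide

set_option maxRecDepth 100000 in
theorem book_fun : ∀ p ∈ bookAlt, ∀ q ∈ bookAlt, p.1 = q.1 → p.2 = q.2 := by decide

def natLook (mh : List String) (j : Nat) : Option String :=
  (bookAlt.find? (fun p => p.1 == mh.take j)).map (·.2)

theorem pvLook_eq_natLook (mh : List String) (hpre : Pre_get_opening_name mh)
    (j : Nat) (h1 : 1 ≤ j) (h2 : j ≤ mh.length) :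
    pvLook mh ((j : Nat) : Int) = natLook mh j := by
  rw [pvLook, PySem.List.slice_to_natCast, lookup_eq, natLook]
  congr 1
  apply find?_congr_mem
  intro p hp
  have hiff : (movesKey p.1 = movesKey (mh.take j)) ↔ (p.1 = mh.take j) := by
    constructor
    · intro he
      have hj : j = (j - 1) + 1 := by omega
      have hcol := hpre (j - 1) (List.mem_range.mpr (by omega)) p hp
      rw [← hj] at hcol
      exact (hcol he.symm).symm
    · intro he; rw [he]
  cases hb : (movesKey p.1 == movesKey (mh.take j)) with
  | true =>
    have he := hiff.mp (eq_of_beq hb)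
    exact (beq_iff_eq.mpr he).symm
  | false =>
    have hne : ¬ p.1 = mh.take j := fun he => by
      rw [hiff.mpr he] at hb; simp at hb
    exact (beq_eq_false_iff_ne.mpr hne).symm

theorem natLook_eq_none_iff (mh : List String) (j : Nat) :
    natLook mh j = none ↔ ∀ p ∈ bookAlt, p.1 ≠ mh.take j := by
  rw [natLook, Option.map_eq_none_iff, List.find?_eq_none]
  constructor
  · intro h p hp he; exact h p hp (beq_iff_eq.mpr he)
  · intro h p hp hb; exact h p hp (eq_of_beq hb)

--------------------------------------------------------------------------------
-- descending findSome?: the first hit is the highest index with a hit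
--------------------------------------------------------------------------------

theorem descN_findSome_none (mh : List String) : ∀ (n : Nat),
    (∀ i, 1 ≤ i → i ≤ n → natLook mh i = none) →
    (descN n).findSome? (natLook mh) = none := by
  intro n
  induction n with
  | zero => intro _; rfl
  | succ j ih =>
    intro h
    rw [descN, List.findSome?_cons, h (j + 1) (by omega) (by omega)]
    exact ih (fun i hi1 hi2 => h i hi1 (by omega))

theorem descN_findSome_some (mh : List String) : ∀ (n i0 : Nat) (v : String),
    1 ≤ i0 → i0 ≤ n → natLook mh i0 = some v →
    (∀ i, i0 < i → i ≤ n → natLook mh i = none) →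
    (descN n).findSome? (natLook mh) = some v := by
  intro n
  induction n with
  | zero => intro i0 v h1 h2 _ _; omega
  | succ j ih =>
    intro i0 v h1 h2 hv hnone
    rw [descN, List.findSome?_cons]
    by_cases hij : i0 = j + 1
    · rw [← hij, hv]
    · rw [hnone (j + 1) (by omega) (by omega)]
      exact ih i0 v h1 (by omega) hv (fun i hi1 hi2 => hnone i hi1 (by omega))

--------------------------------------------------------------------------------
-- B-side: the fold as a structural recursion, and its extremal characterisation
--------------------------------------------------------------------------------

def bestFrom (mh : List String) : Nat → String → List (List String × String) → String
  | _, v, [] => v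
  | j, v, p :: rest =>
    if p.1.length > j ∧ mh.take p.1.length = p.1
    then bestFrom mh p.1.length p.2 rest
    else bestFrom mh j v rest

theorem fold_eq_bestFrom (mh : List String) :
    ∀ (L : List (List String × String)) (j : Nat) (v : String),
      (L.foldl (altStep mh) ((j : Int), v)).2 = bestFrom mh j v L := by
  intro L
  induction L with
  | nil => intro j v; rfl
  | cons p rest ih =>
    intro j v
    rw [List.foldl_cons, bestFrom]
    have hsl : PySem.List.slice mh none (some ((p.1.length : Nat) : Int)) = mh.take p.1.length :=
      PySem.List.slice_to_natCast mh p.1.length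
    by_cases hc : p.1.length > j ∧ mh.take p.1.length = p.1
    · have hb : (((p.1.length : Int) > (j : Int) : Bool)
          && (PySem.List.slice mh none (some (p.1.length : Int)) == p.1)) = true := by
        rw [hsl]
        simp only [Bool.and_eq_true, decide_eq_true_eq, beq_iff_eq]
        exact ⟨by exact_mod_cast hc.1, hc.2⟩
      rw [if_pos hc, altStep]
      simp only [hb, if_true]
      exact ih p.1.length p.2
    · have hb : (((p.1.length : Int) > (j : Int) : Bool)
          && (PySem.List.slice mh none (some (p.1.length : Int)) == p.1)) = false := by
        rw [hsl]
        simp only [Bool.and_eq_false_iff, decide_eq_false_iff_not, beq_eq_false_iff_ne]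
        by_cases hlen : p.1.length > j
        · right; intro he; exact hc ⟨hlen, he⟩
        · left; intro hlt; exact hlen (by exact_mod_cast hlt)
      rw [if_neg hc, altStep]
      simp only [hb, Bool.false_eq_true, if_false]
      exact ih j v

theorem bestFrom_of_dominated (mh : List String) :
    ∀ (L : List (List String × String)) (j : Nat) (v : String),
      (∀ q ∈ L, mh.take q.1.length = q.1 → q.1.length ≤ j) →
      bestFrom mh j v L = v := by
  intro L
  induction L with
  | nil => intro j v _; rfl
  | cons p rest ih =>
    intro j v h
    rw [bestFrom, if_neg]
    · exact ih j v (fun q hq => h q (List.mem_cons_of_mem _ hq))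
    · rintro ⟨hlen, hmatch⟩
      exact absurd (h p List.mem_cons_self hmatch) (by omega)

theorem bestFrom_of_max (mh : List String) :
    ∀ (L : List (List String × String)) (j : Nat) (v : String) (p0 : List String × String),
      p0 ∈ L → mh.take p0.1.length = p0.1 → j < p0.1.length →
      (∀ q ∈ L, mh.take q.1.length = q.1 → q.1.length ≤ p0.1.length) →
      (∀ q ∈ L, mh.take q.1.length = q.1 → q.1.length = p0.1.length → q.2 = p0.2) →
      bestFrom mh j v L = p0.2 := by
  intro L
  induction L with
  | nil => intro j v p0 h; exact absurd h List.not_mem_nil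
  | cons p rest ih =>
    intro j v p0 hmem hm0 hj hmax huniq
    rw [bestFrom]
    by_cases hc : p.1.length > j ∧ mh.take p.1.length = p.1
    · rw [if_pos hc]
      have hle : p.1.length ≤ p0.1.length := hmax p List.mem_cons_self hc.2
      by_cases heq : p.1.length = p0.1.length
      · have hv : p.2 = p0.2 := huniq p List.mem_cons_self hc.2 heq
        rw [bestFrom_of_dominated mh rest p.1.length p.2
          (fun q hq hqm => heq ▸ hmax q (List.mem_cons_of_mem _ hq) hqm)]
        exact hv
      · have hlt : p.1.length < p0.1.length := by omega
        have hp0rest : p0 ∈ rest := by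
          cases List.mem_cons.mp hmem with
          | inl he => exfalso; rw [he] at hlt; omega
          | inr hr => exact hr
        exact ih p.1.length p.2 p0 hp0rest hm0 hlt
          (fun q hq => hmax q (List.mem_cons_of_mem _ hq))
          (fun q hq => huniq q (List.mem_cons_of_mem _ hq))
    · rw [if_neg hc]
      have hp0rest : p0 ∈ rest := by
        cases List.mem_cons.mp hmem with
        | inl he =>
          exfalso
          apply hc
          rw [he] at hj hm0
          exact ⟨hj, hm0⟩
        | inr hr => exact hr
      exact ih j v p0 hp0rest hm0 hj
        (fun q hq => hmax q (List.mem_cons_of_mem _ hq))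
        (fun q hq => huniq q (List.mem_cons_of_mem _ hq))

--------------------------------------------------------------------------------
-- main equivalence
--------------------------------------------------------------------------------

set_option maxRecDepth 400000 in
theorem main_equiv (mh : List String) (hpre : Pre_get_opening_name mh) :
    get_opening_name mh = get_opening_name_alt mh := by
  have hB : get_opening_name_alt mh = bestFrom mh 0 "Unknown Opening" bookAlt := by
    show (bookAlt.foldl (altStep mh) ((0 : Int), "Unknown Opening")).2 = _
    exact_mod_cast fold_eq_bestFrom mh bookAlt 0 "Unknown Opening"
  have hA0 : get_opening_name mh
      = ((descN mh.length).findSome? (natLook mh)).getD "Unknown Opening" := by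
    rw [A_eq_findSome_descN]
    congr 1
    apply findSome?_congr_mem
    intro i hi
    obtain ⟨hi1, hi2⟩ := (mem_descN mh.length i).mp hi
    exact pvLook_eq_natLook mh hpre i hi1 hi2
  by_cases hex : ∃ p ∈ bookAlt, mh.take p.1.length = p.1
  · obtain ⟨pw, hpw, hpwm⟩ := hex
    set M := bookAlt.filter (fun p => decide (mh.take p.1.length = p.1)) with hM
    have hpwM : pw ∈ M := List.mem_filter.mpr ⟨hpw, by simpa using hpwm⟩
    have hMne : M ≠ [] := List.ne_nil_of_mem hpwM
    obtain ⟨p0, hp0⟩ : ∃ p0, p0 ∈ M.argmax (fun p => p.1.length) := by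
      cases h : M.argmax (fun p => p.1.length) with
      | none => exact absurd (List.argmax_eq_none.mp h) hMne
      | some p0 => exact ⟨p0, by simp [Option.mem_def]⟩
    have hp0M : p0 ∈ M := List.argmax_mem hp0
    have hp0book : p0 ∈ bookAlt := (List.mem_filter.mp hp0M).1
    have hp0m : mh.take p0.1.length = p0.1 := by
      have hf := (List.mem_filter.mp hp0M).2
      simpa using hf
    have hmax : ∀ q ∈ bookAlt, mh.take q.1.length = q.1 → q.1.length ≤ p0.1.length := by
      intro q hq hqm
      exact List.le_of_mem_argmax (f := fun p => p.1.length) (List.mem_filter.mpr ⟨hq, by simpa using hqm⟩) hp0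
    have huniq : ∀ q ∈ bookAlt, mh.take q.1.length = q.1 → q.1.length = p0.1.length → q.2 = p0.2 := by
      intro q hq hqm hql
      apply book_fun q hq p0 hp0book
      rw [← hqm, hql, hp0m]
    have hpos : 1 ≤ p0.1.length := by
      have hne := book_wf p0 hp0book
      have hz : p0.1.length ≠ 0 := fun h0 => hne (List.length_eq_zero_iff.mp h0)
      omega
    have hle : p0.1.length ≤ mh.length := by
      have hlen := congrArg List.length hp0m
      simp at hlen
      omega
    have hsome : natLook mh p0.1.length = some p0.2 := by
      rw [natLook]
      cases hf : bookAlt.find? (fun p => p.1 == mh.take p0.1.length) with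
      | none =>
        exfalso
        rw [List.find?_eq_none] at hf
        exact hf p0 hp0book (beq_iff_eq.mpr hp0m.symm)
      | some q =>
        have hq : q ∈ bookAlt := List.mem_of_find?_eq_some hf
        have hpq := List.find?_some hf
        have hqe : q.1 = mh.take p0.1.length := by simpa using hpq
        have hqv : q.2 = p0.2 := book_fun q hq p0 hp0book (by rw [hqe, hp0m])
        simp [hqv]
    have hnone : ∀ i, p0.1.length < i → i ≤ mh.length → natLook mh i = none := by
      intro i hlt hle'
      rw [natLook_eq_none_iff]
      intro p hp he
      have hlenp : p.1.length = i := by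
        have hl := congrArg List.length he
        simp at hl
        omega
      have hpm : mh.take p.1.length = p.1 := by rw [hlenp, ← he]
      have := hmax p hp hpm
      omega
    rw [hA0, descN_findSome_some mh mh.length p0.1.length p0.2 hpos hle hsome hnone, hB,
      bestFrom_of_max mh bookAlt 0 "Unknown Opening" p0 hp0book hp0m (by omega) hmax huniq]
    rfl
  · push Not at hex
    have hnone : ∀ i, 1 ≤ i → i ≤ mh.length → natLook mh i = none := by
      intro i h1 h2
      rw [natLook_eq_none_iff]
      intro p hp he
      have hlenp : p.1.length = i := by
        have hl := congrArg List.length he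
        simp at hl
        omega
      exact hex p hp (by rw [hlenp, ← he])
    rw [hA0, descN_findSome_none mh mh.length hnone, hB,
      bestFrom_of_dominated mh bookAlt 0 "Unknown Opening"
        (fun q hq hqm => absurd hqm (hex q hq))]
    rfl

-- ===== VERDICT (by name: the statement is the Claim_ definition above) =====
theorem get_opening_name_spec : Claim_equal_get_opening_name := by
  intro mh _ hpre
  show get_opening_name mh = get_opening_name_alt mh
  exact main_equiv mh hpre
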